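-- pv_equiv track=rewrite | github.com/kaHaleMaKai/lishpy | core/builtins.py | split_ns_name
-- ===== SOURCE A (Python) =====
-- from typing import Generator
--
-- def split_ns_name(name: str) -> Generator[str, None, None]:
--     i = 0
--     length = len(name)
--     while i < length:
--         try:
--             i = name.index(".", i)
--             yield name[:i]
--             i += 1
--         except ValueError:
--             yield name
--             break
-- ===== SOURCE B (Python) =====
-- from typing import Generator
--
-- def split_ns_name(name: str) -> Generator[str, None, None]:
--     parts = name.split(".")
--     acc = parts[0]
--     for part in parts[1:]:
--         yield acc
--         acc = acc + "." + part
--     if parts[-1] != "":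
--         yield acc
-- ===== Notes on version B (the rewrite author's own statement) =====
-- stated objective: simpler
-- what changed: B splits the name into segments once and folds a running accumulator over them (prefixes plus a final-segment check), instead of A's index-jumping while loop with a caught ValueError.
import Mathlib
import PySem

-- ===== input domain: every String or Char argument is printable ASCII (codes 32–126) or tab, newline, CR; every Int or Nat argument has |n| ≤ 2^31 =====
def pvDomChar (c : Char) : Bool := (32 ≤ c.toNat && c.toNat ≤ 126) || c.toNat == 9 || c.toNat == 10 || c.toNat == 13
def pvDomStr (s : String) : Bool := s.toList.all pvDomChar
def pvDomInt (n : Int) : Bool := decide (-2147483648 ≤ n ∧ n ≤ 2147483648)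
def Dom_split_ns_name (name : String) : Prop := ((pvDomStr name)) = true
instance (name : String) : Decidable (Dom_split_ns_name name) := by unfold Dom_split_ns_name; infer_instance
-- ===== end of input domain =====

-- B replaces A's index-jumping while loop (with its caught ValueError) by split('.') plus a
-- running-accumulator fold; objective: simpler. Both are generators; equality is about the list of yields.

-- ===== PORT A =====
-- name.index(".", i) for natural i: first index ≥ i holding '.'; none = ValueError (exact for a
-- single-character needle and 0 ≤ i ≤ len).
def aFind (cs : List Char) (i : Nat) : Option Nat :=
  (List.findIdx? (· == '.') (cs.drop i)).map (i + ·)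

theorem aFind_ge {cs : List Char} {i j : Nat} (h : aFind cs i = some j) : i ≤ j := by
  simp only [aFind, Option.map_eq_some_iff] at h
  obtain ⟨k, -, rfl⟩ := h
  omega

-- the while loop of A; yields collected in order, name[:i] = cs.take i (exact: 0 ≤ i ≤ len)
def aLoop (cs : List Char) (i : Nat) : List (List Char) :=
  if _h : i < cs.length then
    match hf : aFind cs i with
    | some j => cs.take j :: aLoop cs (j + 1)
    | none => [cs]
  else []
termination_by cs.length - i
decreasing_by have := aFind_ge hf; omega

def split_ns_name (name : String) : List String :=
  (aLoop name.toList 0).map String.mk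

-- ===== PORT B =====
-- the for-loop of Source B: yields acc before extending it; returns (yields, final acc)
def bLoop (acc : List Char) (rest : List (List Char)) : List (List Char) × List Char :=
  match rest with
  | [] => ([], acc)
  | p :: ps =>
    let r := bLoop (acc ++ '.' :: p) ps
    (acc :: r.1, r.2)

def split_ns_name_alt (name : String) : List String :=
  -- name.split(".") ported as List.splitOn '.' (exact for a single-character separator)
  let parts := name.toList.splitOn '.'
  let r := bLoop (parts.headD []) parts.tail
  (if parts.getLastD [] ≠ [] then r.1 ++ [r.2] else r.1).map String.mk

-- ===== PRECONDITION & SPEC =====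
def Spec_split_ns_name (name : String) (out : List String) : Prop := out = split_ns_name_alt name
instance (name : String) (out : List String) : Decidable (Spec_split_ns_name name out) := by unfold Spec_split_ns_name; infer_instance

-- ===== CLAIM (what is proved, stated in full; the proofs are below) =====
def Claim_equal_split_ns_name : Prop := ∀ (name : String), Dom_split_ns_name name → Spec_split_ns_name name (split_ns_name name)

-- ===== LEMMAS AND PROOFS =====

theorem aLoop_eq_cons {cs : List Char} {i j : Nat} (h : i < cs.length)
    (hf : aFind cs i = some j) : aLoop cs i = cs.take j :: aLoop cs (j + 1) := by
  rw [aLoop, dif_pos h]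
  split
  · rename_i j' hf'; rw [hf'] at hf; injection hf with e; subst e; rfl
  · rename_i hf'; rw [hf'] at hf; exact absurd hf (by simp)

theorem aLoop_eq_tail {cs : List Char} {i : Nat} (h : i < cs.length)
    (hf : aFind cs i = none) : aLoop cs i = [cs] := by
  rw [aLoop, dif_pos h]
  split
  · rename_i j' hf'; rw [hf'] at hf; exact absurd hf (by simp)
  · rfl

theorem aLoop_eq_nil {cs : List Char} {i : Nat} (h : ¬ i < cs.length) : aLoop cs i = [] := by
  rw [aLoop, dif_neg h]

theorem splitOn_no_dot (t : List Char) (h : '.' ∉ t) : t.splitOn '.' = [t] := by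
  induction t with
  | nil => rfl
  | cons a t ih =>
    simp only [List.mem_cons, not_or] at h
    simp only [List.splitOn, List.splitOnP_cons] at ih ⊢
    rw [if_neg (by simpa using fun e : a = '.' => h.1 e.symm), ih h.2]
    rfl

theorem splitOn_dot_cons (t u : List Char) (h : '.' ∉ t) :
    (t ++ '.' :: u).splitOn '.' = t :: u.splitOn '.' := by
  induction t with
  | nil =>
    simp only [List.nil_append, List.splitOn, List.splitOnP_cons]
    simp
  | cons a t ih =>
    simp only [List.mem_cons, not_or] at h
    simp only [List.splitOn, List.cons_append, List.splitOnP_cons] at ih ⊢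
    rw [if_neg (by simpa using fun e : a = '.' => h.1 e.symm), ih h.2]
    rfl

theorem bLoop_shift (rest : List (List Char)) (x acc : List Char) :
    bLoop (x ++ acc) rest =
      ((bLoop acc rest).1.map (x ++ ·), x ++ (bLoop acc rest).2) := by
  induction rest generalizing acc with
  | nil => simp [bLoop]
  | cons p ps ih =>
    simp only [bLoop, List.map_cons, List.append_assoc]
    rw [ih]

theorem drop_shift (t u : List Char) (m : Nat) :
    (t ++ u).drop (t.length + m) = u.drop m := by
  rw [List.drop_append, List.drop_of_length_le (by omega)]
  simp

theorem aLoop_shift (u : List Char) (m : Nat) (t : List Char) :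
    aLoop (t ++ u) (t.length + m) = (aLoop u m).map (t ++ ·) := by
  induction m using aLoop.induct (cs := u) with
  | case1 m hm j hf ih =>
    have hlt : t.length + m < (t ++ u).length := by simp; omega
    simp only [aFind, Option.map_eq_some_iff] at hf
    obtain ⟨k, hk, hkj⟩ := hf
    have hfu : aFind u m = some j := by
      simp only [aFind, hk, Option.map_some]
      simp only [Option.some.injEq]
      omega
    have hj : aFind (t ++ u) (t.length + m) = some (t.length + j) := by
      simp only [aFind, drop_shift, hk, Option.map_some]
      simp only [Option.some.injEq]
      omega
    rw [aLoop_eq_cons hlt hj, aLoop_eq_cons hm hfu, List.map_cons]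
    have h1 : (t ++ u).take (t.length + j) = t ++ u.take j := by
      rw [List.take_add, List.take_left' rfl, List.drop_left' rfl]
    have h2 : t.length + j + 1 = t.length + (j + 1) := by omega
    rw [h1, h2, ih]
  | case2 m hm hf =>
    have hlt : t.length + m < (t ++ u).length := by simp; omega
    have hn : aFind (t ++ u) (t.length + m) = none := by
      simp only [aFind, drop_shift, Option.map_eq_none_iff]
      simpa [aFind, Option.map_eq_none_iff] using hf
    rw [aLoop_eq_tail hlt hn, aLoop_eq_tail hm hf]
    simp
  | case3 m hm =>
    rw [aLoop_eq_nil (by simp; omega), aLoop_eq_nil hm]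
    simp

theorem findIdx?_decomp {cs : List Char} {j : Nat}
    (h : List.findIdx? (· == '.') cs = some j) :
    ∃ t u, cs = t ++ '.' :: u ∧ t.length = j ∧ '.' ∉ t := by
  induction cs generalizing j with
  | nil => simp at h
  | cons a cs ih =>
    rw [List.findIdx?_cons] at h
    by_cases ha : a = '.'
    · subst ha
      simp at h
      exact ⟨[], cs, by simp [← h]⟩
    · rw [if_neg (by simpa using ha)] at h
      obtain ⟨k, hk, rfl⟩ := Option.map_eq_some_iff.mp h
      obtain ⟨t, u, rfl, rfl, ht⟩ := ih hk
      refine ⟨a :: t, u, rfl, by simp, ?_⟩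
      intro hmem
      rcases List.mem_cons.mp hmem with h' | h'
      · exact ha h'.symm
      · exact ht h'

-- the core of split_ns_name_alt, on char lists
def bCore (cs : List Char) : List (List Char) :=
  let parts := cs.splitOn '.'
  let r := bLoop (parts.headD []) parts.tail
  if parts.getLastD [] ≠ [] then r.1 ++ [r.2] else r.1

theorem main_core (cs : List Char) : aLoop cs 0 = bCore cs := by
  induction hn : cs.length using Nat.strong_induction_on generalizing cs with
  | _ n ih =>
  subst hn
  match hfi : List.findIdx? (· == '.') cs with
  | none =>
    have hfind : aFind cs 0 = none := by simp [aFind, hfi]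
    have hnd : '.' ∉ cs := by
      intro hmem
      have := List.findIdx?_eq_none_iff.mp hfi '.' hmem
      simp at this
    rw [bCore, splitOn_no_dot cs hnd]
    match cs with
    | [] => simp [aLoop_eq_nil, bLoop]
    | c :: cs' =>
      rw [aLoop_eq_tail (by simp) hfind]
      simp [bLoop]
  | some j =>
    obtain ⟨t, u, rfl, rfl, ht⟩ := findIdx?_decomp hfi
    have hfind : aFind (t ++ '.' :: u) 0 = some t.length := by
      simp only [aFind, List.drop_zero, hfi, Option.map_some, Option.some.injEq]
      omega
    -- A side
    rw [aLoop_eq_cons (by simp) hfind, List.take_left' rfl]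
    have hA : aLoop (t ++ '.' :: u) (t.length + 1)
        = (aLoop u 0).map ((t ++ ['.']) ++ ·) := by
      have h1 : t ++ '.' :: u = (t ++ ['.']) ++ u := by simp
      have h2 : t.length + 1 = (t ++ ['.']).length + 0 := by simp
      rw [h1, h2, aLoop_shift]
    rw [hA, ih u.length (by simp; omega) u rfl]
    -- B side
    rw [bCore, bCore, splitOn_dot_cons t u ht]
    have hsp := List.splitOnP_ne_nil (fun a => a == '.') u
    match hu : u.splitOn '.' with
    | [] => exact absurd hu hsp
    | q :: qs =>
      simp only [List.headD_cons, List.tail_cons]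
      have hb : bLoop (t ++ '.' :: q) qs
          = ((bLoop q qs).1.map ((t ++ ['.']) ++ ·), (t ++ ['.']) ++ (bLoop q qs).2) := by
        have : t ++ '.' :: q = (t ++ ['.']) ++ q := by simp
        rw [this, bLoop_shift]
      simp only [bLoop, hb, List.getLastD_cons]
      split_ifs with hc
      · simp
      · simp

-- ===== VERDICT (by name: the statement is the Claim_ definition above) =====
theorem split_ns_name_spec : Claim_equal_split_ns_name := by
  intro name _
  unfold Spec_split_ns_name split_ns_name split_ns_name_alt
  rw [main_core]
  rfl
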